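-- pv_equiv track=rewrite | github.com/nicotaglia14/DS_analysis | DS_ANALYSIS/hashing_analysis/main.py | addition_method
-- ===== SOURCE A (Python) =====
-- hash_table = {}
--
-- def create_keys(word):
--     key = 0
--     for letter in word:
--         index = ord(letter)
--         key += index
--     return key
--
-- def addition_method(passwords):
--     collisions = 0
--     hash_table.clear()
--     for word in passwords:
--         key = create_keys(word)
--
--         # If statement that determines if there is a value assigned to that key and detect collisions
--         if hash_table.get(key) is None:
--             hash_table[key] = word
--         else:
--             collisions += 1
--     return collisions
-- ===== SOURCE B (Python) =====
-- hash_table = {}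
--
-- def addition_method(passwords):
--     # Same side effect as A: hash_table ends holding each key -> first word seen.
--     hash_table.clear()
--     keys = [sum(map(ord, w)) for w in passwords]
--     for k, w in zip(keys, passwords):
--         hash_table.setdefault(k, w)
--     # Sort the keys and count adjacent duplicates: every repeated occurrence of a
--     # key lands next to an equal neighbour exactly once, so this equals the number
--     # of collisions A counts.
--     s = sorted(keys)
--     return sum(1 for a, b in zip(s, s[1:]) if a == b)
-- ===== Notes on version B (the rewrite author's own statement) =====
-- stated objective: alternative
-- what changed: Replaces A's incremental hash-table membership test with a sort-then-scan algorithm: compute all char-sum keys, sort them, and count adjacent equal pairs in the sorted list (each repeated key occurrence sits next to an equal neighbour exactly once); the global hash_table is still cleared and filled first-seen.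
import Mathlib
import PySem

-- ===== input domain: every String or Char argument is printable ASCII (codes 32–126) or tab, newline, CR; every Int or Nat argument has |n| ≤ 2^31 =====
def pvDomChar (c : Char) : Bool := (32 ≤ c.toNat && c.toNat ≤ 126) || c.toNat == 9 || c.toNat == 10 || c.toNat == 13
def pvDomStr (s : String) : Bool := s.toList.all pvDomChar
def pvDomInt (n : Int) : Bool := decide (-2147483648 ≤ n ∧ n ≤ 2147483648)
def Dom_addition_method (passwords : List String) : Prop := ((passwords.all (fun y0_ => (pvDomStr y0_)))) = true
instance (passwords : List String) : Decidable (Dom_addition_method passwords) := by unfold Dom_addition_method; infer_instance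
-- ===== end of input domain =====

-- B replaces A's incremental membership-test counter by a sort-then-scan: sort the char-sum keys
-- and count adjacent equal pairs. Both Pythons mutate the module-global hash_table identically
-- (clear, then first word per key); the equivalence proved here is about the RETURN value only.

-- ===== PORT A =====
def create_keys (word : String) : Int :=
  word.toList.foldl (fun key letter => key + (letter.toNat : Int)) 0

def addition_method (passwords : List String) : Int :=
  (passwords.foldl (fun (st : PySem.Dict Int String × Int) word =>
      let key := create_keys word
      match st.1.get? key with
      | none => (st.1.insert key word, st.2)
      | some _ => (st.1, st.2 + 1)) (PySem.Dict.empty, 0)).2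

-- ===== PORT B =====
-- `s[1:]` is ported as `s.tail` (= PySem.List.slice s 1 none, slice_from); `sum(1 for … if …)`
-- is the obvious fold over the zipped pairs.
def addition_method_alt (passwords : List String) : Int :=
  let keys := passwords.map (fun w => (w.toList.map (fun c => (c.toNat : Int))).sum)
  let s := PySem.List.sorted keys (fun x => x) false
  (s.zip s.tail).foldl (fun acc p => if p.1 == p.2 then acc + 1 else acc) (0 : Int)

-- ===== PRECONDITION & SPEC =====
def Spec_addition_method (passwords : List String) (out : Int) : Prop := out = addition_method_alt passwords
instance (passwords : List String) (out : Int) : Decidable (Spec_addition_method passwords out) := by unfold Spec_addition_method; infer_instance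

-- ===== CLAIM (what is proved, stated in full; the proofs are below) =====
def Claim_equal_addition_method : Prop := ∀ (passwords : List String), Dom_addition_method passwords → Spec_addition_method passwords (addition_method passwords)

-- ===== LEMMAS AND PROOFS =====

theorem foldl_add_ord (l : List Char) (a : Int) :
    l.foldl (fun key letter => key + (letter.toNat : Int)) a
      = a + (l.map (fun c => (c.toNat : Int))).sum := by
  induction l generalizing a with
  | nil => simp
  | cons c cs ih =>
      simp only [List.foldl_cons, List.map_cons, List.sum_cons, ih]
      ring

theorem create_keys_eq (w : String) :
    create_keys w = (w.toList.map (fun c => (c.toNat : Int))).sum := by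
  unfold create_keys
  rw [foldl_add_ord]
  ring

-- A's loop counts length minus the number of distinct keys (new keys grow the dict).
theorem addition_method_loop (ws : List String) (d : PySem.Dict Int String) (c : Int) :
    (ws.foldl (fun (st : PySem.Dict Int String × Int) word =>
        let key := create_keys word
        match st.1.get? key with
        | none => (st.1.insert key word, st.2)
        | some _ => (st.1, st.2 + 1)) (d, c)).2
      = c + (ws.length : Int)
        - (((PySem.Set.update d.keys (ws.map create_keys)).length : Int) - (d.keys.length : Int)) := by
  induction ws generalizing d c with
  | nil => simp [PySem.Set.update]
  | cons w ws ih =>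
      simp only [List.foldl_cons, List.map_cons, List.length_cons]
      cases h : d.get? (create_keys w) with
      | none =>
          have hnm : create_keys w ∉ d.keys := by
            rw [← PySem.Dict.get?_eq_none_iff_not_mem_keys]
            exact h
          have hkeys : (d.insert (create_keys w) w).keys = d.keys ++ [create_keys w] := by
            apply PySem.Dict.keys_insert_of_not_contains
            by_contra hc
            simp only [Bool.not_eq_false] at hc
            exact hnm ((PySem.Dict.contains_iff_mem_keys d _).mp hc)
          rw [ih]
          have hupd : PySem.Set.update d.keys (create_keys w :: ws.map create_keys)
              = PySem.Set.update (d.keys ++ [create_keys w]) (ws.map create_keys) := by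
            simp only [PySem.Set.update, List.foldl_cons, PySem.Set.add_of_not_mem hnm]
          rw [hkeys, ← hupd]
          simp only [List.length_append, List.length_cons, List.length_nil]
          push_cast
          ring
      | some v =>
          have hmem : create_keys w ∈ d.keys := by
            by_contra hc
            rw [← PySem.Dict.get?_eq_none_iff_not_mem_keys] at hc
            simp [hc] at h
          rw [ih]
          have hupd : PySem.Set.update d.keys (create_keys w :: ws.map create_keys)
              = PySem.Set.update d.keys (ws.map create_keys) := by
            simp only [PySem.Set.update, List.foldl_cons, PySem.Set.add_of_mem hmem]
          rw [← hupd]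
          push_cast
          ring

-- B's fold counts the adjacent equal pairs.
theorem foldl_count_pairs (ps : List (Int × Int)) (a : Int) :
    ps.foldl (fun acc p => if p.1 == p.2 then acc + 1 else acc) a
      = a + (ps.countP (fun p => p.1 == p.2) : Int) := by
  induction ps generalizing a with
  | nil => simp
  | cons p ps ih =>
      simp only [List.foldl_cons, List.countP_cons, ih]
      by_cases h : p.1 = p.2 <;> simp [h] <;> push_cast <;> ring

-- On a ≤-sorted list, the number of adjacent equal pairs is length minus the number of
-- distinct elements.
theorem count_adj_eq_sorted (l : List Int) (hs : l.Pairwise (· ≤ ·)) :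
    ((l.zip l.tail).countP (fun p => p.1 == p.2)) = l.length - l.toFinset.card := by
  induction l with
  | nil => simp
  | cons a t ih =>
      cases t with
      | nil => simp
      | cons b u =>
          have hab : a ≤ b := (List.pairwise_cons.mp hs).1 b (by simp)
          have hbu : ∀ x ∈ u, b ≤ x := fun x hx =>
            (List.pairwise_cons.mp (List.pairwise_cons.mp hs).2).1 x hx
          have ht : (b :: u).Pairwise (· ≤ ·) := (List.pairwise_cons.mp hs).2
          have ihb := ih ht
          have hcard_le : (b :: u).toFinset.card ≤ (b :: u).length := List.toFinset_card_le _
          simp only [List.tail_cons, List.length_cons] at ihb hcard_le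
          simp only [List.zip_cons_cons, List.tail_cons, List.countP_cons, List.length_cons]
          rw [List.toFinset_cons]
          by_cases h : a = b
          · have hmem : a ∈ (b :: u).toFinset := by simp [h]
            rw [Finset.insert_eq_self.mpr hmem]
            simp only [h, beq_self_eq_true, if_pos]
            omega
          · have hlt : a < b := lt_of_le_of_ne hab h
            have hnm : a ∉ (b :: u).toFinset := by
              simp only [List.mem_toFinset, List.mem_cons]
              rintro (rfl | hx)
              · exact h rfl
              · exact absurd (hbu a hx) (not_le.mpr hlt)
            rw [Finset.card_insert_of_notMem hnm]
            simp only [beq_iff_eq, h, if_false, ite_false]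
            omega

theorem set_ofList_length_eq_card (l : List Int) :
    (PySem.Set.ofList l).length = l.toFinset.card := by
  have hnd : (PySem.Set.ofList l).Nodup := PySem.Set.nodup_ofList l
  have hfs : (PySem.Set.ofList l).toFinset = l.toFinset := by
    ext x
    simp [List.mem_toFinset, PySem.Set.mem_ofList]
  rw [← List.toFinset_card_of_nodup hnd, hfs]

-- ===== VERDICT (by name: the statement is the Claim_ definition above) =====
theorem addition_method_spec : Claim_equal_addition_method := by
  intro passwords _
  unfold Spec_addition_method addition_method addition_method_alt
  rw [addition_method_loop, foldl_count_pairs]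
  simp only [PySem.Dict.keys_empty, PySem.Set.update_nil_left, List.length_nil]
  set keys := passwords.map (fun w => (w.toList.map (fun c => (c.toNat : Int))).sum) with hk
  have hmap : passwords.map create_keys = keys := by
    exact List.map_congr_left (fun w _ => create_keys_eq w)
  rw [hmap]
  set s := PySem.List.sorted keys (fun x => x) false with hsdef
  have hperm : s.Perm keys := PySem.List.sorted_perm keys (fun x => x) false
  have hpw : s.Pairwise (· ≤ ·) := by
    have := PySem.List.sorted_pairwise keys (fun x => x)
    simpa using this
  have hcount := count_adj_eq_sorted s hpw
  have hfs : s.toFinset = keys.toFinset := by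
    ext x; simp [hperm.mem_iff]
  have hlen : s.length = keys.length := hperm.length_eq
  have hcard_le : keys.toFinset.card ≤ keys.length := List.toFinset_card_le _
  rw [hcount, hfs, hlen, set_ofList_length_eq_card]
  have hplen : keys.length = passwords.length := by rw [hk]; exact List.length_map ..
  push_cast [Int.natCast_sub hcard_le]
  rw [hplen]
  ring
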